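-- pv_equiv track=rewrite | github.com/lazydancer/Arrows | src/draft/maker/form.py | ports_right
-- ===== SOURCE A (Python) =====
-- def ports_right(level, connections):
--     result = []
--     for section in level:
--         result += sorted(list(map(
--             lambda x: x[1],
--             filter(
--                 lambda x: x[1][0] == section,
--                 connections
--             ))))
--
--     return result
-- ===== SOURCE B (Python) =====
-- def ports_right(level, connections):
--     buckets = {}
--     for _, tgt in connections:
--         buckets.setdefault(tgt[0], []).append(tgt)
--     out = []
--     for section in level:
--         out += sorted(buckets.get(section, []))
--     return out
-- ===== Notes on version B (the rewrite author's own statement) =====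
-- stated objective: faster
-- what changed: B buckets the connection targets into a dict keyed by target[0] in one pass, then sorts each section's bucket, instead of re-filtering the whole connection list for every section.
import Mathlib
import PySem

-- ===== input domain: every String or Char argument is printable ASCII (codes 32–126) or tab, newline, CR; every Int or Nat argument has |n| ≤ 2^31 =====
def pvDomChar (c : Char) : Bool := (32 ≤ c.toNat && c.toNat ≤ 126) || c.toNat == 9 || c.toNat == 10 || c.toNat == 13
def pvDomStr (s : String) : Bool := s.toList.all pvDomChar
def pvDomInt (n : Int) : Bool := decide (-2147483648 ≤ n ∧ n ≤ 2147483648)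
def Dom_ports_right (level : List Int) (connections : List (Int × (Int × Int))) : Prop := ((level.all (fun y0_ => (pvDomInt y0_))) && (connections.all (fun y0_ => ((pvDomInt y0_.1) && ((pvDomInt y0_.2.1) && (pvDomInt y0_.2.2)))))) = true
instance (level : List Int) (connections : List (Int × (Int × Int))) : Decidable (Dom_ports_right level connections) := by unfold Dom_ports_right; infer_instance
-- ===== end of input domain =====

-- B buckets targets into a dict keyed by target[0] in one pass, then sorts each section's bucket (faster: no per-section rescan of connections).
-- ===== PORT A =====
def ports_right (level : List Int) (connections : List (Int × (Int × Int))) : List (Int × Int) :=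
  level.foldl (fun result sec =>
    result ++ PySem.List.sorted2 ((connections.filter (fun x => x.2.1 == sec)).map (fun x => x.2)) (fun p => p.1) (fun p => p.2)) []

-- ===== PORT B =====
def ports_right_alt (level : List Int) (connections : List (Int × (Int × Int))) : List (Int × Int) :=
  let buckets := connections.foldl (fun d x => d.modify x.2.1 [] (fun l => l ++ [x.2])) PySem.Dict.empty
  level.foldl (fun out sec =>
    out ++ PySem.List.sorted2 (buckets.getD sec []) (fun p => p.1) (fun p => p.2)) []

-- ===== PRECONDITION & SPEC =====
def Spec_ports_right (level : List Int) (connections : List (Int × (Int × Int))) (out : List (Int × Int)) : Prop := out = ports_right_alt level connections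
instance (level : List Int) (connections : List (Int × (Int × Int))) (out : List (Int × Int)) : Decidable (Spec_ports_right level connections out) := by unfold Spec_ports_right; infer_instance

-- ===== CLAIM (what is proved, stated in full; the proofs are below) =====
def Claim_equal_ports_right : Prop := ∀ (level : List Int) (connections : List (Int × (Int × Int))), Dom_ports_right level connections → Spec_ports_right level connections (ports_right level connections)

-- ===== LEMMAS AND PROOFS =====

-- ===== VERDICT (by name: the statement is the Claim_ definition above) =====
lemma bucket_getD (connections : List (Int × (Int × Int))) (s : Int) :
    (connections.foldl (fun d x => d.modify x.2.1 [] (fun l => l ++ [x.2])) PySem.Dict.empty).getD s []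
      = (connections.filter (fun x => x.2.1 == s)).map (fun x => x.2) := by
  have h := PySem.Dict.getD_foldl_modify_append
    (l := connections.map (fun x => (x.2.1, x.2))) (d := PySem.Dict.empty) (c := s)
  simp only [List.foldl_map, List.filter_map, List.map_map, PySem.Dict.getD_empty,
    List.nil_append] at h
  exact h

theorem ports_right_spec : Claim_equal_ports_right := by
  intro level connections _
  unfold Spec_ports_right ports_right ports_right_alt
  apply PySem.List.foldl_congr_mem
  intro acc x _
  rw [bucket_getD]
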